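-- pv_equiv track=rewrite | github.com/argishtib/armenian_history_timeline | build_timeline_from_excel.py | _parse_translation_header
-- ===== SOURCE A (Python) =====
-- LOCALE_BY_SUFFIX: dict[str, str] = {
--     "en": "en",
--     "ru": "ru",
--     "ir": "fa",
--     "fr": "fr",
-- }
--
-- def _parse_translation_header(header: list[str]) -> tuple[str | None, dict[str, tuple[str | None, str | None]]]:
--     """
--     Returns (id_column_name, locale -> (section_col, description_col)).
--     Matches columns ending with _section_{en,ru,ir,fr} and _description_{en,ru,ir,fr}.
--     """
--     id_col: str | None = None
--     for h in header:
--         if not h: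
--             continue
--         hl = h.lower()
--         if hl.endswith("_id") and "translation" not in hl:
--             id_col = h
--             break
--     if id_col is None and header:
--         id_col = header[0]
--
--     pairs: dict[str, tuple[str | None, str | None]] = {
--         loc: (None, None) for loc in ("en", "ru", "fa", "fr")
--     }
--
--     for h in header:
--         if not h:
--             continue
--         hl = h.lower()
--         for suf, loc in LOCALE_BY_SUFFIX.items():
--             if hl.endswith(f"_section_{suf}"):
--                 sec, desc = pairs[loc]
--                 pairs[loc] = (h, desc)
--             elif hl.endswith(f"_description_{suf}"):
--                 sec, desc = pairs[loc]
--                 pairs[loc] = (sec, h)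
--
--     return id_col, pairs
-- ===== SOURCE B (Python) =====
-- LOCALE_BY_SUFFIX: dict[str, str] = {
--     "en": "en",
--     "ru": "ru",
--     "ir": "fa",
--     "fr": "fr",
-- }
--
-- def _parse_translation_header(header):
--     candidates = [h for h in header
--                   if h.lower().endswith("_id") and "translation" not in h.lower()]
--     id_col = candidates[0] if candidates else (header[0] if header else None)
--
--     rev = header[::-1]
--
--     def last_match(suffix):
--         # first match in the reversed header = last match in the header
--         for h in rev:
--             if h.lower().endswith(suffix):
--                 return h
--         return None
--
--     pairs = {loc: (last_match(f"_section_{suf}"), last_match(f"_description_{suf}"))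
--              for suf, loc in LOCALE_BY_SUFFIX.items()}
--     return id_col, pairs
-- ===== Notes on version B (the rewrite author's own statement) =====
-- stated objective: alternative
-- what changed: B replaces A's single forward pass that mutates a locale-keyed dict (last write wins) by reversing the header once and doing eight independent early-exit first-match searches over the reversed list, one per (section/description, suffix) target, and computes the id column from a filtered candidates list instead of a break loop.
import Mathlib
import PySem

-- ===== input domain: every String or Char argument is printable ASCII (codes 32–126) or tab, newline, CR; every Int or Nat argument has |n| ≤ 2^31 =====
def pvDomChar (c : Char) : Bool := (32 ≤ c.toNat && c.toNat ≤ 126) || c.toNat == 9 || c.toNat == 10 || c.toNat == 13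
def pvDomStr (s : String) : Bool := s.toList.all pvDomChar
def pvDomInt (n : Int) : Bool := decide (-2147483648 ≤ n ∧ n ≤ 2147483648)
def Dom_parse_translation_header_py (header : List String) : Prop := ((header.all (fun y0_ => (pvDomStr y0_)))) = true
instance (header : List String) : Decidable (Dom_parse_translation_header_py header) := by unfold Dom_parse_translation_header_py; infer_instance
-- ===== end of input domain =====

-- B replaces A's single forward dict-updating pass by eight early-exit reverse searches:
-- it reverses the header once and takes the FIRST match in the reversed list per
-- (section/description, suffix) target — equal to A's last-wins forward pass;
-- objective: alternative decomposition, same asymptotic cost.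

-- ===== PORT A =====
-- id-column search loop with break
def pvAIdLoop : List String → Option String
  | [] => none
  | h :: rest =>
    if h = "" then pvAIdLoop rest
    else
      let hl := PySem.Str.lower h
      if PySem.Str.endswith hl "_id" && !(PySem.Str.isIn "translation" hl) then some h
      else pvAIdLoop rest

-- LOCALE_BY_SUFFIX.items()
def pvAItems : List (String × String) := [("en", "en"), ("ru", "ru"), ("ir", "fa"), ("fr", "fr")]

-- body of A's second loop for one header h (the 'if not h: continue' and the inner items loop);
-- pairs[loc] always has the key, ported as getD with an unused default
def pvAItemStep (h hl : String) (d : PySem.Dict String (Option String × Option String))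
    (sl : String × String) : PySem.Dict String (Option String × Option String) :=
  if PySem.Str.endswith hl ("_section_" ++ sl.1) then
    let sd := d.getD sl.2 (none, none)
    d.insert sl.2 (some h, sd.2)
  else if PySem.Str.endswith hl ("_description_" ++ sl.1) then
    let sd := d.getD sl.2 (none, none)
    d.insert sl.2 (sd.1, some h)
  else d

def pvAStep (h : String) (pairs : PySem.Dict String (Option String × Option String)) :
    PySem.Dict String (Option String × Option String) :=
  if h = "" then pairs
  else
    let hl := PySem.Str.lower h
    pvAItems.foldl (pvAItemStep h hl) pairs

def parse_translation_header_py (header : List String) :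
    Option String × (List (String × Option String × Option String)) :=
  let id0 := pvAIdLoop header
  let id_col := match id0 with | some x => some x | none => header.head?
  let pairs0 : PySem.Dict String (Option String × Option String) :=
    ["en", "ru", "fa", "fr"].foldl (fun d loc => d.insert loc (none, none)) PySem.Dict.empty
  let pairs := header.foldl (fun d h => pvAStep h d) pairs0
  (id_col, pairs.items)

-- ===== PORT B =====
-- predicate of B's candidates comprehension
def pvBP (h : String) : Bool :=
  PySem.Str.endswith (PySem.Str.lower h) "_id"
    && !(PySem.Str.isIn "translation" (PySem.Str.lower h))

-- B's last_match: first match in the reversed header (early exit = find?)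
def pvBLastMatch (rev : List String) (suffix : String) : Option String :=
  rev.find? (fun h => PySem.Str.endswith (PySem.Str.lower h) suffix)

def parse_translation_header_py_alt (header : List String) :
    Option String × (List (String × Option String × Option String)) :=
  let id_col := ((header.filter pvBP).head?).or header.head?
  let rev := header.reverse   -- header[::-1]
  let pairs := [("en", "en"), ("ru", "ru"), ("ir", "fa"), ("fr", "fr")].map
    (fun sl => (sl.2, (pvBLastMatch rev ("_section_" ++ sl.1),
                       pvBLastMatch rev ("_description_" ++ sl.1))))
  (id_col, pairs)

-- ===== PRECONDITION & SPEC =====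
def Spec_parse_translation_header_py (header : List String) (out : Option String × (List (String × Option String × Option String))) : Prop := out = parse_translation_header_py_alt header
instance (header : List String) (out : Option String × (List (String × Option String × Option String))) : Decidable (Spec_parse_translation_header_py header out) := by unfold Spec_parse_translation_header_py; infer_instance

-- ===== CLAIM =====
def Claim_equal_parse_translation_header_py : Prop := ∀ (header : List String), Dom_parse_translation_header_py header → Spec_parse_translation_header_py header (parse_translation_header_py header)

-- ===== LEMMAS AND PROOFS =====

lemma pvId_eq (header : List String) : pvAIdLoop header = header.find? pvBP := by
  induction header with
  | nil => rfl
  | cons h t ih =>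
    by_cases hh : h = ""
    · subst hh; simpa [pvAIdLoop, List.find?, show pvBP "" = false from rfl] using ih
    · simp only [pvAIdLoop, if_neg hh, List.find?, pvBP]
      cases hc : (PySem.Str.endswith (PySem.Str.lower h) "_id" &&
          !(PySem.Str.isIn "translation" (PySem.Str.lower h))) <;> simp [ih]

-- section/description predicates for one suffix
def pvSec (suf h : String) : Bool := PySem.Str.endswith (PySem.Str.lower h) ("_section_" ++ suf)
def pvDesc (suf h : String) : Bool := PySem.Str.endswith (PySem.Str.lower h) ("_description_" ++ suf)

-- one header step on a single (sec, desc) slot — A's elif chain specialised to one suffix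
def pvSlot (suf : String) (sd : Option String × Option String) (h : String) :
    Option String × Option String :=
  if pvSec suf h then (some h, sd.2)
  else if pvDesc suf h then (sd.1, some h)
  else sd

lemma pvSlot_empty (suf : String) (hsuf : suf ∈ ["en", "ru", "ir", "fr"])
    (s : Option String × Option String) : pvSlot suf s "" = s := by
  fin_cases hsuf <;> rfl

lemma pvItemEn (h hl : String) (s1 s2 s3 s4 : Option String × Option String) :
    pvAItemStep h hl ⟨[("en", s1), ("ru", s2), ("fa", s3), ("fr", s4)]⟩ ("en", "en") =
    ⟨[("en", (if PySem.Str.endswith hl ("_section_" ++ "en") = true then (some h, s1.2) else if PySem.Str.endswith hl ("_description_" ++ "en") = true then (s1.1, some h) else s1)), ("ru", s2), ("fa", s3), ("fr", s4)]⟩ := by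
  unfold pvAItemStep; split_ifs <;> rfl

lemma pvItemRu (h hl : String) (s1 s2 s3 s4 : Option String × Option String) :
    pvAItemStep h hl ⟨[("en", s1), ("ru", s2), ("fa", s3), ("fr", s4)]⟩ ("ru", "ru") =
    ⟨[("en", s1), ("ru", (if PySem.Str.endswith hl ("_section_" ++ "ru") = true then (some h, s2.2) else if PySem.Str.endswith hl ("_description_" ++ "ru") = true then (s2.1, some h) else s2)), ("fa", s3), ("fr", s4)]⟩ := by
  unfold pvAItemStep; split_ifs <;> rfl

lemma pvItemIr (h hl : String) (s1 s2 s3 s4 : Option String × Option String) :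
    pvAItemStep h hl ⟨[("en", s1), ("ru", s2), ("fa", s3), ("fr", s4)]⟩ ("ir", "fa") =
    ⟨[("en", s1), ("ru", s2), ("fa", (if PySem.Str.endswith hl ("_section_" ++ "ir") = true then (some h, s3.2) else if PySem.Str.endswith hl ("_description_" ++ "ir") = true then (s3.1, some h) else s3)), ("fr", s4)]⟩ := by
  unfold pvAItemStep; split_ifs <;> rfl

lemma pvItemFr (h hl : String) (s1 s2 s3 s4 : Option String × Option String) :
    pvAItemStep h hl ⟨[("en", s1), ("ru", s2), ("fa", s3), ("fr", s4)]⟩ ("fr", "fr") =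
    ⟨[("en", s1), ("ru", s2), ("fa", s3), ("fr", (if PySem.Str.endswith hl ("_section_" ++ "fr") = true then (some h, s4.2) else if PySem.Str.endswith hl ("_description_" ++ "fr") = true then (s4.1, some h) else s4))]⟩ := by
  unfold pvAItemStep; split_ifs <;> rfl

lemma pvStep_eq (h : String) (s1 s2 s3 s4 : Option String × Option String) :
    pvAStep h ⟨[("en", s1), ("ru", s2), ("fa", s3), ("fr", s4)]⟩ =
    ⟨[("en", pvSlot "en" s1 h), ("ru", pvSlot "ru" s2 h),
      ("fa", pvSlot "ir" s3 h), ("fr", pvSlot "fr" s4 h)]⟩ := by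
  by_cases hh : h = ""
  · subst hh
    simp [pvAStep, pvSlot_empty "en" (by simp), pvSlot_empty "ru" (by simp),
      pvSlot_empty "ir" (by simp), pvSlot_empty "fr" (by simp)]
  · simp only [pvAStep, if_neg hh, pvAItems, List.foldl,
      pvItemEn, pvItemRu, pvItemIr, pvItemFr, pvSlot, pvSec, pvDesc]
    rfl

lemma pvFold_eq (header : List String) (s1 s2 s3 s4 : Option String × Option String) :
    header.foldl (fun d h => pvAStep h d) ⟨[("en", s1), ("ru", s2), ("fa", s3), ("fr", s4)]⟩ =
    ⟨[("en", header.foldl (pvSlot "en") s1), ("ru", header.foldl (pvSlot "ru") s2),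
      ("fa", header.foldl (pvSlot "ir") s3), ("fr", header.foldl (pvSlot "fr") s4)]⟩ := by
  induction header generalizing s1 s2 s3 s4 with
  | nil => rfl
  | cons h t ih => simp only [List.foldl, pvStep_eq, ih]

-- a string ending with "_description_<suf>" cannot also end with "_section_<suf>"
lemma pvDesc_not_sec (suf : String) (hsuf : suf ∈ ["en", "ru", "ir", "fr"]) (h : String)
    (hd : pvDesc suf h = true) : pvSec suf h = false := by
  by_contra hs
  rw [Bool.not_eq_false] at hs
  have hs' : ("_section_" ++ suf).toList <:+ (PySem.Str.lower h).toList := by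
    have := (PySem.Chars.endswith_iff (s := (PySem.Str.lower h).toList)
      (p := ("_section_" ++ suf).toList)).mp (by simpa [pvSec] using hs)
    exact this
  have hd' : ("_description_" ++ suf).toList <:+ (PySem.Str.lower h).toList := by
    have := (PySem.Chars.endswith_iff (s := (PySem.Str.lower h).toList)
      (p := ("_description_" ++ suf).toList)).mp (by simpa [pvDesc] using hd)
    exact this
  have hlen : ("_section_" ++ suf).toList.length ≤ ("_description_" ++ suf).toList.length := by
    fin_cases hsuf <;> decide
  have : ("_section_" ++ suf).toList <:+ ("_description_" ++ suf).toList :=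
    List.suffix_of_suffix_length_le hs' hd' hlen
  fin_cases hsuf <;> exact absurd this (by decide)

-- A's per-slot last-wins fold = first match in the reversed list (with fallbacks)
lemma pvSlot_fold_find (suf : String) (l : List String) (a b : Option String) :
    l.foldl (pvSlot suf) (a, b) =
    ((l.reverse.find? (pvSec suf)).or a,
     (l.reverse.find? (fun h => !pvSec suf h && pvDesc suf h)).or b) := by
  induction l generalizing a b with
  | nil => simp
  | cons h t ih =>
    have hfst : (pvSlot suf (a, b) h).1 = if pvSec suf h then some h else a := by
      unfold pvSlot; split_ifs <;> rfl
    have hsnd : (pvSlot suf (a, b) h).2 =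
        if !pvSec suf h && pvDesc suf h then some h else b := by
      unfold pvSlot
      cases hp : pvSec suf h <;> cases hd : pvDesc suf h <;> simp
    simp only [List.foldl, ih, List.reverse_cons, List.find?_append, Option.or_assoc]
    apply Prod.ext
    · simp only []
      congr 1
      cases hp : pvSec suf h <;> simp [List.find?, hp, hfst]
    · simp only []
      congr 1
      cases hq : (!pvSec suf h && pvDesc suf h) <;> simp [List.find?, hq, hsnd]

lemma pvGuard_eq (suf : String) (hsuf : suf ∈ ["en", "ru", "ir", "fr"]) :
    (fun h => !pvSec suf h && pvDesc suf h) = pvDesc suf := by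
  funext h
  cases hd : pvDesc suf h
  · simp
  · simp [pvDesc_not_sec suf hsuf h hd]

lemma pvSlot_fold_main (suf : String) (hsuf : suf ∈ ["en", "ru", "ir", "fr"])
    (l : List String) :
    l.foldl (pvSlot suf) (none, none) =
    (pvBLastMatch l.reverse ("_section_" ++ suf), pvBLastMatch l.reverse ("_description_" ++ suf)) := by
  rw [pvSlot_fold_find, pvGuard_eq suf hsuf]
  simp only [Option.or_none]
  rfl

-- ===== VERDICT (by name: the statement is the Claim_ definition above) =====
theorem parse_translation_header_py_spec : Claim_equal_parse_translation_header_py := by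
  unfold Claim_equal_parse_translation_header_py
  intro header _
  unfold Spec_parse_translation_header_py
  simp only [parse_translation_header_py, parse_translation_header_py_alt, pvId_eq,
    List.head?_filter, List.map]
  rw [show (List.foldl (fun d loc => d.insert loc ((none : Option String), (none : Option String)))
        PySem.Dict.empty ["en", "ru", "fa", "fr"]) =
      (⟨[("en", (none, none)), ("ru", (none, none)), ("fa", (none, none)), ("fr", (none, none))]⟩ :
        PySem.Dict String (Option String × Option String)) from rfl, pvFold_eq,
    pvSlot_fold_main "en" (by simp), pvSlot_fold_main "ru" (by simp),
    pvSlot_fold_main "ir" (by simp), pvSlot_fold_main "fr" (by simp)]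
  cases header.find? pvBP <;> rfl
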